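-- pv_equiv track=rewrite | github.com/eugenevinitsky/bayesian_reasoning_traffic | bayesian_inference/test_bayesian_inference.py | ped_combos_one_loc_fixed_lsts
-- ===== SOURCE A (Python) =====
-- def all_ped_combos_lsts(num_locs=4, val_set=("0", "1")):
--     """Return a list of all pedestrian observation combinations (in list format) for a vehicle under the 4 location scheme"""
--     res = []
--     if num_locs == 0:
--         return []
--     if num_locs == 1:
--         return [[flag] for flag in val_set]
--
--     for comb in all_ped_combos_lsts(num_locs - 1, val_set):
--         # append a flag for all possible flags
--         for flag in val_set:
--             appended = comb + [flag]
--             res.append(appended)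
--
--     return res
--
-- def ped_combos_one_loc_fixed_lsts(fixed_loc, fixed_val, num_locs=4, val_set=("0", "1")):
--     """Return a list of all ped observation combs for a vehicle under the 4 location scheme
--     SUBJECT TO fixed_loc == fix_val
--
--     This is handy for summation selection in equation (4) of the derivation
--
--     @Parameters
--     fixed_loc: int
--         location from 0, 1, 2, 3
--     fixed_val: int
--         location from -1, 0, 1
--     """
--     fixed_val = str(fixed_val)
--     assert fixed_loc < num_locs and (fixed_val in val_set or str(fixed_val) in val_set)
--
--     res = []
--     for comb in all_ped_combos_lsts(num_locs - 1, val_set):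
--         # insert fixed val at correct position
--         left = comb[:fixed_loc]
--         right = comb[fixed_loc:]
--         res.append(left + [fixed_val] + right)
--
--     return res
-- ===== SOURCE B (Python) =====
-- def ped_combos_one_loc_fixed_lsts(fixed_loc, fixed_val, num_locs=4, val_set=("0", "1")):
--     """Enumerate by counting in base len(val_set): combo i is the n-digit
--     base-k representation of i (most significant first), no recursion."""
--     fixed_val = str(fixed_val)
--     assert fixed_loc < num_locs and (fixed_val in val_set or str(fixed_val) in val_set)
--
--     n = num_locs - 1
--     if n <= 0:
--         return []
--     k = len(val_set)
--     res = []
--     for idx in range(k ** n):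
--         digits = []
--         for _ in range(n):
--             digits.append(val_set[idx % k])
--             idx //= k
--         digits.reverse()
--         res.append(digits[:fixed_loc] + [fixed_val] + digits[fixed_loc:])
--     return res
-- ===== Notes on version B (the rewrite author's own statement) =====
-- stated objective: alternative
-- what changed: Replaces the recursive level-by-level helper with direct index enumeration: combo i is the base-len(val_set) representation of i (most significant digit first), decoded by div/mod, then the fixed value is spliced in.
import Mathlib
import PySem

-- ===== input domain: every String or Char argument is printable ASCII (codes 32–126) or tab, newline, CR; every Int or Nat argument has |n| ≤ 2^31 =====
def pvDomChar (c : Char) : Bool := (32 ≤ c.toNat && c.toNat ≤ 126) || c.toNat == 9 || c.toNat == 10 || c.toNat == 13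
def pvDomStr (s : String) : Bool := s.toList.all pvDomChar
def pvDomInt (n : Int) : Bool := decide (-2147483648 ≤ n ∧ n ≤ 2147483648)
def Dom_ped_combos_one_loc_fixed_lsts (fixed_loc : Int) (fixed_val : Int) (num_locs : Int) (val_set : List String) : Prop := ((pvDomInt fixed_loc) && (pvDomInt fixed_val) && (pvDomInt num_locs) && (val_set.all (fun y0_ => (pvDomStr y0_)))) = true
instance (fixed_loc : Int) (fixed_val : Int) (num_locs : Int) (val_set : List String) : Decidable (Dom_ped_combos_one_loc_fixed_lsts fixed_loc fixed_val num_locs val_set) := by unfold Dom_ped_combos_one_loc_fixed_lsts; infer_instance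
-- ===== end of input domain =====

-- B replaces A's recursive combination-builder by direct base-k index decoding (an
-- alternative algorithm of the same cost); equivalence is proved on Pre_ (where A's
-- assert passes and its helper terminates).

-- ===== PORT A =====
-- Python recurses on the int num_locs; inside Pre_ the argument is ≥ 0 and decreases
-- to the 0/1 base cases, so Nat fuel (num_locs - 1).toNat is exact there.
def allPedLsts (fuel : Nat) (val_set : List String) : List (List String) :=
  match fuel with
  | 0 => []
  | 1 => val_set.map (fun flag => [flag])
  | (m+2) =>
      (allPedLsts (m+1) val_set).foldl
        (fun res comb => val_set.foldl (fun res flag => res ++ [comb ++ [flag]]) res) []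

def ped_combos_one_loc_fixed_lsts (fixed_loc : Int) (fixed_val : Int) (num_locs : Int) (val_set : List String) : List (List String) :=
  let fv := PySem.Int.toStr fixed_val
  (allPedLsts (num_locs - 1).toNat val_set).foldl
    (fun res comb =>
      res ++ [PySem.List.slice comb none (some fixed_loc) ++ [fv] ++ PySem.List.slice comb (some fixed_loc) none]) []

-- ===== PORT B =====
-- Source B's inner loop: append val_set[idx % k] n times (idx //= k each step), then reverse.
-- idx and k are nonnegative, so Nat's % and / coincide with Python's; val_set[idx % k]
-- is in range whenever the loop runs (k > 0 there), so getD's default is never used.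
def pvDecodeDigits : Nat → Nat → Nat → List String → List String → List String
  | 0, _, _, _, digits => digits.reverse
  | (m+1), idx, k, vs, digits => pvDecodeDigits m (idx / k) k vs (digits ++ [vs.getD (idx % k) ""])

def ped_combos_one_loc_fixed_lsts_alt (fixed_loc : Int) (fixed_val : Int) (num_locs : Int) (val_set : List String) : List (List String) :=
  let fv := PySem.Int.toStr fixed_val
  let n := num_locs - 1
  if n ≤ 0 then []
  else
    let k := val_set.length
    (List.range (k ^ n.toNat)).foldl
      (fun res idx =>
        let digits := pvDecodeDigits n.toNat idx k val_set []
        res ++ [PySem.List.slice digits none (some fixed_loc) ++ [fv] ++ PySem.List.slice digits (some fixed_loc) none]) []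

-- ===== PRECONDITION & SPEC =====
-- Pre_ excludes exactly the inputs on which A raises: the assert fails (fixed_loc ≥
-- num_locs or str(fixed_val) ∉ val_set → AssertionError), or num_locs ≤ 0, where the
-- helper recurses without reaching a base case (RecursionError).
def Pre_ped_combos_one_loc_fixed_lsts (fixed_loc : Int) (fixed_val : Int) (num_locs : Int) (val_set : List String) : Prop :=
  1 ≤ num_locs ∧ fixed_loc < num_locs ∧ PySem.Int.toStr fixed_val ∈ val_set
instance (fixed_loc : Int) (fixed_val : Int) (num_locs : Int) (val_set : List String) : Decidable (Pre_ped_combos_one_loc_fixed_lsts fixed_loc fixed_val num_locs val_set) := by unfold Pre_ped_combos_one_loc_fixed_lsts; infer_instance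

def pvWitness_ped_combos_one_loc_fixed_lsts : Int × Int × Int × List String := (0, 0, 2, ["0", "1"])

def Spec_ped_combos_one_loc_fixed_lsts (fixed_loc : Int) (fixed_val : Int) (num_locs : Int) (val_set : List String) (out : List (List String)) : Prop := out = ped_combos_one_loc_fixed_lsts_alt fixed_loc fixed_val num_locs val_set
instance (fixed_loc : Int) (fixed_val : Int) (num_locs : Int) (val_set : List String) (out : List (List String)) : Decidable (Spec_ped_combos_one_loc_fixed_lsts fixed_loc fixed_val num_locs val_set out) := by unfold Spec_ped_combos_one_loc_fixed_lsts; infer_instance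

-- ===== CLAIM (what is proved, stated in full; the proofs are below) =====
def Claim_equal_ped_combos_one_loc_fixed_lsts : Prop := ∀ (fixed_loc : Int) (fixed_val : Int) (num_locs : Int) (val_set : List String), Dom_ped_combos_one_loc_fixed_lsts fixed_loc fixed_val num_locs val_set → Pre_ped_combos_one_loc_fixed_lsts fixed_loc fixed_val num_locs val_set → Spec_ped_combos_one_loc_fixed_lsts fixed_loc fixed_val num_locs val_set (ped_combos_one_loc_fixed_lsts fixed_loc fixed_val num_locs val_set)


-- ===== LEMMAS AND PROOFS =====

theorem pvDecodeDigits_acc (m : Nat) : ∀ (idx k : Nat) (vs : List String) (acc : List String),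
    pvDecodeDigits m idx k vs acc = pvDecodeDigits m idx k vs [] ++ acc.reverse := by
  induction m with
  | zero => intro idx k vs acc; simp [pvDecodeDigits]
  | succ m ih =>
      intro idx k vs acc
      rw [pvDecodeDigits, pvDecodeDigits, ih, ih (idx / k) k vs ([] ++ _)]
      simp

theorem pvDecodeDigits_succ (m idx k : Nat) (vs : List String) :
    pvDecodeDigits (m+1) idx k vs [] = pvDecodeDigits m (idx / k) k vs [] ++ [vs.getD (idx % k) ""] := by
  rw [pvDecodeDigits, pvDecodeDigits_acc]; simp

theorem map_eq_range_getD {β : Type} (f : String → β) (vs : List String) :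
    vs.map f = (List.range vs.length).map (fun i => f (vs.getD i "")) := by
  apply List.ext_getElem
  · simp
  · intro i h1 h2
    simp only [List.getElem_map, List.getElem_range]
    rw [List.getD_eq_getElem _ _ (by simpa using h1)]

theorem foldl_append_singleton' {α β : Type} (l : List α) (f : α → β) :
    ∀ (acc : List β), l.foldl (fun res x => res ++ [f x]) acc = acc ++ l.map f := by
  induction l with
  | nil => simp
  | cons a l ih => intro acc; simp [List.foldl_cons, ih]

theorem foldl_append_list {α β : Type} (l : List α) (g : α → List β) :
    ∀ (acc : List β), l.foldl (fun res x => res ++ g x) acc = acc ++ l.flatMap g := by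
  induction l with
  | nil => simp
  | cons a l ih => intro acc; simp [List.foldl_cons, ih]

theorem range_mul_flatMap (a b : Nat) :
    List.range (a * b) = (List.range a).flatMap (fun q => (List.range b).map (fun r => q * b + r)) := by
  induction a with
  | zero => simp
  | succ a ih =>
      rw [Nat.succ_mul, List.range_add, ih, List.range_succ]
      simp [List.flatMap_append]

-- A's helper enumerates exactly the base-k digit decodings of 0 .. k^n - 1 (k = vs.length).
theorem allPedLsts_eq_decode (m : Nat) (vs : List String) :
    allPedLsts (m+1) vs = (List.range (vs.length ^ (m+1))).map
      (fun i => pvDecodeDigits (m+1) i vs.length vs []) := by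
  induction m with
  | zero =>
      rw [allPedLsts, pow_one]
      rw [map_eq_range_getD (fun flag => [flag]) vs]
      apply List.map_congr_left
      intro i hi
      rw [List.mem_range] at hi
      rw [pvDecodeDigits_succ]
      simp [pvDecodeDigits, Nat.mod_eq_of_lt hi]
  | succ m ih =>
      rw [allPedLsts]
      have hinner : ∀ (res : List (List String)) (comb : List String),
          vs.foldl (fun res flag => res ++ [comb ++ [flag]]) res
            = res ++ vs.map (fun flag => comb ++ [flag]) := by
        intro res comb; exact foldl_append_singleton' vs _ res
      simp only [hinner]
      rw [foldl_append_list, ih]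
      rcases Nat.eq_zero_or_pos vs.length with hk | hk
      · simp [hk]
      · rw [List.flatMap_map]
        have : vs.length ^ (m+1+1) = vs.length ^ (m+1) * vs.length := by ring
        rw [this, range_mul_flatMap]
        rw [List.map_flatMap]
        apply List.flatMap_congr
        intro q _
        rw [List.map_map, map_eq_range_getD (fun flag => pvDecodeDigits (m+1) q vs.length vs [] ++ [flag]) vs]
        apply List.map_congr_left
        intro r hr
        rw [List.mem_range] at hr
        simp only [Function.comp]
        rw [pvDecodeDigits_succ (m+1) (q * vs.length + r) vs.length vs]
        have hm2 : (q * vs.length + r) % vs.length = r := by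
          rw [Nat.add_comm, Nat.add_mul_mod_self_right, Nat.mod_eq_of_lt hr]
        have hd : (q * vs.length + r) / vs.length = q := by
          rw [Nat.add_comm, Nat.add_mul_div_right _ _ hk, Nat.div_eq_of_lt hr, Nat.zero_add]
        rw [hd, hm2]

-- ===== VERDICT (by name: the statement is the Claim_ definition above) =====
theorem ped_combos_one_loc_fixed_lsts_spec : Claim_equal_ped_combos_one_loc_fixed_lsts := by
  intro fixed_loc fixed_val num_locs val_set _ hpre
  obtain ⟨h1, _, _⟩ := hpre
  unfold Spec_ped_combos_one_loc_fixed_lsts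
  unfold ped_combos_one_loc_fixed_lsts ped_combos_one_loc_fixed_lsts_alt
  by_cases hn : num_locs - 1 ≤ 0
  · -- num_locs = 1: A folds over allPedLsts 0 = []; B returns [] directly
    have : num_locs = 1 := by omega
    subst this
    simp [allPedLsts]
  · simp only [if_neg hn]
    have hpos : 1 ≤ num_locs - 1 := by omega
    obtain ⟨m, hm⟩ : ∃ m, (num_locs - 1).toNat = m + 1 := ⟨(num_locs - 1).toNat - 1, by omega⟩
    rw [hm, allPedLsts_eq_decode, List.foldl_map]
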